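-- pv_equiv track=rewrite | github.com/matthew-wong1/FaultFinder | faultfinder.py | parse_wgpu_validation_error
-- ===== SOURCE A (Python) =====
-- def parse_wgpu_validation_error(full_validation_error):
--     # wgpu: in format eg device::create_texture error
--     # need to get all the chars to the left of (until colon) and right of underscore (until space) to get call name
--     # get all chars before :: to get object name
--     formatted = ""
--
--     for char in full_validation_error:
--         if char == " ":
--             break
--
--         if char != ":" and char != "_":
--             formatted += char
--
--     return formatted
-- ===== SOURCE B (Python) =====
-- def parse_wgpu_validation_error(full_validation_error):
--     head = full_validation_error.split(" ", 1)[0]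
--     return head.replace(":", "").replace("_", "")
-- ===== Notes on version B (the rewrite author's own statement) =====
-- stated objective: simpler
-- what changed: Replaces the character-by-character accumulation loop with early break by a two-stage computation: split off the prefix before the first space with split(" ", 1), then delete the colon and underscore characters with two replace calls.
import Mathlib
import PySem

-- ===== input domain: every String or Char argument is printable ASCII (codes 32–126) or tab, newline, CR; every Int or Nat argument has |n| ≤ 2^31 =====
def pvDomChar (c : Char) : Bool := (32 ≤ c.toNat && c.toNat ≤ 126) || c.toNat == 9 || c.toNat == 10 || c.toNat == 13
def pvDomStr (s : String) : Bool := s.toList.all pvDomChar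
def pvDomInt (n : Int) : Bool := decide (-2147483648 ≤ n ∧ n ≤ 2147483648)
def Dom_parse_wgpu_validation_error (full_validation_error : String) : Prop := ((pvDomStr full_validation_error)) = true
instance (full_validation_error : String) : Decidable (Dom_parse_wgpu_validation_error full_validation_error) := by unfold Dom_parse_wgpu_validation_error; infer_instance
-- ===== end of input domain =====

-- B replaces A's character-by-character loop (early break at the first space) with split(" ", 1)[0]
-- followed by two replace calls deleting ':' and '_' — simpler two-stage decomposition, same values.


-- ===== PORT A =====
-- 'for char in …: if char == " ": break; if char != ":" and char != "_": formatted += char'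
def parseGoA : List Char → List Char → List Char
  | acc, [] => acc
  | acc, c :: cs =>
    if c = ' ' then acc
    else if c ≠ ':' ∧ c ≠ '_' then parseGoA (acc ++ [c]) cs
    else parseGoA acc cs

def parse_wgpu_validation_error (full_validation_error : String) : String :=
  String.ofList (parseGoA [] full_validation_error.toList)

-- ===== PORT B =====
-- head = s.split(" ", 1)[0]; return head.replace(":", "").replace("_", "")
def parse_wgpu_validation_error_alt (full_validation_error : String) : String :=
  let head := PySem.List.pyGetD ((PySem.Str.splitMax? full_validation_error " " 1).getD []) 0 ""
  PySem.Str.replace (PySem.Str.replace head ":" "") "_" ""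

-- ===== PRECONDITION & SPEC =====
def Spec_parse_wgpu_validation_error (full_validation_error : String) (out : String) : Prop := out = parse_wgpu_validation_error_alt full_validation_error
instance (full_validation_error : String) (out : String) : Decidable (Spec_parse_wgpu_validation_error full_validation_error out) := by unfold Spec_parse_wgpu_validation_error; infer_instance

-- ===== CLAIM (what is proved, stated in full; the proofs are below) =====
def Claim_equal_parse_wgpu_validation_error : Prop := ∀ (full_validation_error : String), Dom_parse_wgpu_validation_error full_validation_error → Spec_parse_wgpu_validation_error full_validation_error (parse_wgpu_validation_error full_validation_error)

-- ===== LEMMAS AND PROOFS =====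

-- A's loop accumulates exactly the filtered prefix before the first space.
theorem parseGoA_eq (l acc : List Char) :
    parseGoA acc l = acc ++ (l.takeWhile (· ≠ ' ')).filter (fun c => c ≠ ':' ∧ c ≠ '_') := by
  induction l generalizing acc with
  | nil => simp [parseGoA]
  | cons c cs ih =>
    by_cases hsp : c = ' '
    · simp [parseGoA, hsp]
    · by_cases hk : c ≠ ':' ∧ c ≠ '_'
      · simp [parseGoA, hsp, hk, ih, List.takeWhile]
      · simp [parseGoA, hsp, hk, ih, List.takeWhile]

-- splitOnMax.go with maxsplit budget 0 dumps the rest as one piece.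
theorem splitGo_zero (sep : List Char) (fuel : Nat) (l : List Char)
    (ac : List (List Char)) : PySem.Chars.splitOnMax.go sep fuel 0 l [] ac = (l :: ac).reverse := by
  cases fuel with
  | zero => cases l <;> simp [PySem.Chars.splitOnMax.go]
  | succ n => cases l <;> simp [PySem.Chars.splitOnMax.go]

-- With maxsplit budget 1, the first produced piece is the prefix before the first space.
theorem splitGo_one (fuel : Nat) (l cur : List Char) (ac : List (List Char))
    (hf : l.length ≤ fuel) :
    ∃ rest, PySem.Chars.splitOnMax.go [' '] fuel 1 l cur ac =
      ac.reverse ++ (cur.reverse ++ l.takeWhile (· ≠ ' ')) :: rest := by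
  induction fuel generalizing l cur ac with
  | zero =>
    have : l = [] := List.eq_nil_of_length_eq_zero (Nat.le_zero.mp hf)
    subst this
    exact ⟨[], by simp [PySem.Chars.splitOnMax.go]⟩
  | succ n ih =>
    cases l with
    | nil => exact ⟨[], by simp [PySem.Chars.splitOnMax.go]⟩
    | cons c cs =>
      by_cases hsp : c = ' '
      · refine ⟨[cs], ?_⟩
        subst hsp
        simp only [PySem.Chars.splitOnMax.go]
        rw [if_neg (by decide), if_pos (by simp [List.isPrefixOf])]
        simp [splitGo_zero, List.takeWhile]
      · obtain ⟨rest, hrest⟩ := ih cs (c :: cur) ac (by simpa using Nat.le_of_succ_le_succ hf)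
        refine ⟨rest, ?_⟩
        simp only [PySem.Chars.splitOnMax.go]
        rw [if_neg (by decide),
            if_neg (by simp [List.isPrefixOf]; exact fun h => (hsp h.symm).elim)]
        rw [hrest]
        simp [List.takeWhile, hsp]

-- replace with a single-char needle and empty replacement is a filter.
theorem replaceGo_filter (c0 : Char) (fuel : Nat) (l acc : List Char) (hf : l.length ≤ fuel) :
    PySem.Chars.replace.go [c0] [] fuel l acc = acc.reverse ++ l.filter (· ≠ c0) := by
  induction fuel generalizing l acc with
  | zero =>
    have : l = [] := List.eq_nil_of_length_eq_zero (Nat.le_zero.mp hf)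
    subst this; simp [PySem.Chars.replace.go]
  | succ n ih =>
    cases l with
    | nil => simp [PySem.Chars.replace.go]
    | cons c cs =>
      have hlen : cs.length ≤ n := by simpa using Nat.le_of_succ_le_succ hf
      by_cases h : c0 = c
      · subst h
        simp only [PySem.Chars.replace.go]
        rw [if_pos (by simp [List.isPrefixOf])]
        simp [ih cs acc hlen, List.filter]
      · simp only [PySem.Chars.replace.go]
        rw [if_neg (by simp [List.isPrefixOf]; exact fun h' => h h')]
        rw [ih cs (c :: acc) hlen]
        have hne : c ≠ c0 := fun h' => h h'.symm
        simp [List.filter, hne]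

theorem replace_filter (l : List Char) (c0 : Char) :
    PySem.Chars.replace l [c0] [] = l.filter (· ≠ c0) := by
  simp [PySem.Chars.replace, replaceGo_filter c0 l.length l [] (le_refl _)]

-- ===== VERDICT (by name: the statement is the Claim_ definition above) =====
theorem parse_wgpu_validation_error_spec : Claim_equal_parse_wgpu_validation_error := by
  intro s _
  unfold Spec_parse_wgpu_validation_error parse_wgpu_validation_error parse_wgpu_validation_error_alt
  apply String.ext
  obtain ⟨rest, hsplit⟩ := splitGo_one (s.toList.length + 1) s.toList [] [] (Nat.le_succ _)
  have hsep : (" " : String).toList = [' '] := by decide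
  have hcolon : (":" : String).toList = [':'] := by decide
  have hus : ("_" : String).toList = ['_'] := by decide
  have hemp : ("" : String).toList = ([] : List Char) := by decide
  simp only [PySem.Str.splitMax?, PySem.Chars.splitMax?, PySem.Str.replace,
    PySem.Chars.splitOnMax, hsep, hcolon, hus, hemp]
  rw [if_neg (by decide), if_neg (by decide)]
  simp only [show ((1 : Int)).toNat = 1 from rfl]
  rw [hsplit]
  simp only [List.reverse_nil, List.nil_append, Option.map_some, Option.getD_some,
    List.map_cons, PySem.List.pyGetD_zero_cons, String.toList_ofList]
  rw [replace_filter, replace_filter, parseGoA_eq, List.filter_filter]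
  simp only [List.nil_append]
  apply List.filter_congr
  intro c _
  by_cases h1 : c = ':' <;> by_cases h2 : c = '_' <;> simp [h1, h2]
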